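/-
  MACHINE-WORD LEMMAS FOR 32-BIT `int` CODE (general facts: nothing here speaks of giflib's objects).
  giflib's code is full of 32-bit arithmetic: loop counters, `movsxd`, `cdqe`, signed compares, `lea [p + i*4]`, byte stores of a 32-bit
  register, narrow reads of wide stack slots, the inline shadow stores of a protected frame. The walker leaves each of them in a fixed
  bit-level form; the lemmas below turn these forms into numbers. LOOK HERE FIRST, before writing a private word lemma in a unit.

  ALREADY IN THE SHARED PACKAGE (not repeated here; `open ProgX ProgX.Spec Asan`):
      ProgX.toNat_ofBV32 x            (Word.ofBV x).toNat = x.toNat                       (x : BitVec 32; `mov r32, …` zero-extends)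
      ProgX.toNat_part32 r            (Word.part .w32 r).toNat = r.toNat % 2 ^ 32          (= Asan.part32_toNat)
      ProgX.byte_of_part32 x          (BitVec.setWidth 8 (Word.part .w32 x)).toNat = x.toNat % 256       (`mov [m8], r8` of a 32-bit value)
      ProgX.readLE_stored_byte32      reading back that byte
      ProgX.Spec.ofNat_toNat_sub      UInt64.ofNat (w.toNat - k) = w - UInt64.ofNat k      (k ≤ w.toNat)
      UserX.bv32_ofNat_toNat v        BitVec.ofNat 32 v.toNat = v
      X86.User.Mem.readLE_lt f a n    f.readLE a n < 2 ^ (8 * n)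
      Asan.shadowAddr_add g i         shadowAddr g + UInt64.ofNat i = shadowAddr (g + i)

  §1  SIGNED 32-BIT VALUES                                                                              namespace Gif.Spec
      sint32 n                        the signed reading of a 32-bit number (a plain `if`: unfold, then `omega`)
      sint32_cases n                  both cases of `sint32`, for `omega`
      sint32_of_lt                    n < 2 ^ 31 → sint32 n = n
      toInt_ofNat32 n                 n < 2 ^ 32 → (BitVec.ofNat 32 n).toInt = sint32 n
      part32_toInt x                  (Word.part .w32 x).toInt = sint32 (x.toNat % 2 ^ 32)
      s32 w, s64 w                    abbrev: (Word.part .w32 w).toInt, (Word.part .w64 w).toInt  (the walker's signed-compare forms)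
      argInt r, argU32 r              abbrev: sint32 (r.toNat % 2 ^ 32), r.toNat % 2 ^ 32
      argInt_def, s32_eq_argInt       unfolding; s32 w = argInt w
      arg32 u r                       (u.reg r).toNat % 2 ^ 32, IRREDUCIBLE (an atom for the frame tactics); arg32_def (@[vspec]) unfolds it
      IsNeg32 u r k                   the register holds the negative `int` −k: 1 ≤ k ≤ 2 ^ 31 ∧ arg32 u r = 2 ^ 32 − k
  §2  `int` VALUES IN 64-BIT POINTER ARITHMETIC
      sext32_toNat y                  (Word.ofBV (signExtend 64 y)).toNat = if y.toNat < 2 ^ 31 then y.toNat else y.toNat + (2 ^ 64 − 2 ^ 32)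
      word32_sext x                   x.toNat % 2 ^ 32 < 2 ^ 31 → (Word.ofBV (signExtend 64 (Word.part .w32 x))).toNat = x.toNat % 2 ^ 32
                                      (`movsxd r64, r32` / `cdqe` of a non-negative `int`; the form of giflib's contracts)
      word32_part_toInt x             x.toNat % 2 ^ 32 < 2 ^ 31 → (Word.part .w32 x).toInt = x.toNat % 2 ^ 32
      word32_sar x s                  x.toNat % 2 ^ 32 < 2 ^ 31 → (Word.ofBV ((Word.part .w32 x).sshiftRight s)).toNat = x.toNat % 2 ^ 32 / 2 ^ s
      arg32_sext, IsNeg32.sext, arg32_sar     the same for a register of a state (`arg32 u r`); −k sign-extends to 2 ^ 64 − k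
      add_neg_mul4 p y k              y.toNat = 2 ^ 64 − k → (p + y * 4).toNat = p.toNat − 4 k            (`lea [p + y*4]`, y = −k)
      add_mul4 p x i                  x.toNat = i → (p + x * 4).toNat = p.toNat + 4 i  (no wrap); add_mul8 likewise
  §3  BIT-LEVEL FORMS AS NUMBERS
      readLE_field mem w k n          mem.readLE (w + UInt64.ofNat k) n = rd mem (w.toNat + k) n          (a field load `mov r, [rdi + k]`)
      toNat_sext32 x                  x.toNat < 2 ^ 31 → (Word.ofBV (signExtend 64 x)).toNat = x.toNat
      toInt_of_lt x                   x.toNat < 2 ^ 31 → x.toInt = x.toNat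
      toNat_ofNat32 n                 n < 2 ^ 32 → (BitVec.ofNat 32 n).toNat = n
      toNat_ofBV_ofNat32 n            n < 2 ^ 32 → (Word.ofBV (BitVec.ofNat 32 n)).toNat = n
      toNat_sub32 a b                 b ≤ a < 2 ^ 32 → (BitVec.ofNat 32 a − BitVec.ofNat 32 b).toNat = a − b
      toNat_lea32 x y                 (setWidth 32 (Word.ofBV x + Word.ofBV y + 32).toBitVec).toNat = (x + y + 32) % 2 ^ 32   (`lea r32, [a + b + 0x20]`)
  §4  32-BIT COUNTERS (a C `int` counter generalised as the word `UInt64.ofNat i`, `i < 2 ^ 31`)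
      cnt32_part i                    Word.part .w32 (UInt64.ofNat i) = BitVec.ofNat 32 i
      cnt32_part_toNat i              i < 2 ^ 32 → (Word.part .w32 (UInt64.ofNat i)).toNat = i
      cnt32_toInt i                   i < 2 ^ 31 → (BitVec.ofNat 32 i).toInt = i
      cnt32_part_toInt i              i < 2 ^ 31 → (Word.part .w32 (UInt64.ofNat i)).toInt = i           (what `cmp r32, … ; jl` compares)
      cnt32_slt_iff i c               i, c < 2 ^ 31 → ((Word.part .w32 (UInt64.ofNat i)).toInt < (Word.part .w32 (UInt64.ofNat c)).toInt ↔ i < c)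
                                      (THE BRANCH FACT of `cmp r32, r32 ; jg / jl` with both registers given as `UInt64.ofNat`: `(cnt32_slt_iff …).mp hbr_<addr>`)
      cnt32_ofBV i                    i < 2 ^ 32 → Word.ofBV (BitVec.ofNat 32 i) = UInt64.ofNat i         (`mov r32, [m32]`)
      cnt32_sext_bv i                 i < 2 ^ 31 → Word.ofBV (signExtend 64 (BitVec.ofNat 32 i)) = UInt64.ofNat i        (`movsxd r64, [m32]`)
      cnt32_sext i                    i < 2 ^ 31 → Word.ofBV (signExtend 64 (Word.part .w32 (UInt64.ofNat i))) = UInt64.ofNat i   (`movsxd r64, r32`)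
      cnt32_sext_toNat i              its `toNat` form
      cnt32_succ_bv i                 BitVec.ofNat 32 i + 1#32 = BitVec.ofNat 32 (i + 1)
      cnt32_succ_bv_toNat i           i + 1 < 2 ^ 32 → (BitVec.ofNat 32 i + 1#32).toNat = i + 1
      cnt32_add i c                   i + c < 2 ^ 32 → Word.ofBV (Word.part .w32 (UInt64.ofNat i) + BitVec.ofNat 32 c) = UInt64.ofNat (i + c)
      cnt32_succ i                    i + 1 < 2 ^ 32 → Word.ofBV (Word.part .w32 (UInt64.ofNat i) + 1#32) = UInt64.ofNat (i + 1)   (`++i`)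
      cnt32_elem4 p i, cnt32_elem8    (p + Word.ofBV (signExtend 64 (Word.part .w32 (UInt64.ofNat i))) * 4).toNat = p.toNat + 4 i  (resp. 8)
      bv32_reload_eq x                BitVec.ofNat 32 (x.toNat % 4294967296) = x                          (a dword spilled and reloaded)
      bv32_toInt_cases x              x.toInt by cases on x.toNat < 2 ^ 31, for `omega`
      ofBV32_toNat_lt x               (Word.ofBV x).toNat < 2 ^ 32
      word_sub_toNat_le w k           k ≤ w.toNat → (w − UInt64.ofNat k).toNat = w.toNat − k
      cnt32_sext_shl x k              k ≤ 5, x.toNat < 2 ^ 31 → (Word.ofBV (signExtend 64 (Word.part .w32 x)) <<< UInt64.ofNat k).toNat = x.toNat · 2 ^ k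
      cnt32_sext_bv_shl2 m            m < 2 ^ 31 → (Word.ofBV (signExtend 64 (BitVec.ofNat 32 m)) <<< 2).toNat = 4 m
      cnt32_argInt i                  i < 2 ^ 31 → argInt (UInt64.ofNat i) = i
      argInt_neg_one                  argInt (Word.ofBV 0xffffffff#32) = −1                              (`mov r32, 0xffffffff`)
  §5  WHAT giflib NEEDS IN ADDITION
      toInt_lt_iff_of_lt x y          x, y < 2 ^ 31 → (x.toInt < y.toInt ↔ x.toNat < y.toNat)            (a signed compare of two non-negative `int`s)
      toInt_le_iff_of_lt x y          the same for ≤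
      movzx8_toNat n                  (Word.ofBV (zeroExtend 32 (BitVec.ofNat 8 n))).toNat = n % 256     (`movzx r32, byte [m]`, n = the byte read)
      movzx8_lt n                     … < 256
      movzx8_of_lt n                  n < 256 → Word.ofBV (zeroExtend 32 (BitVec.ofNat 8 n)) = UInt64.ofNat n
      movzx8_readLE f a               (Word.ofBV (zeroExtend 32 (BitVec.ofNat 8 (f.readLE a 1)))).toNat = f.readLE a 1
      movzx8_reg_lt x                 (Word.ofBV (zeroExtend 32 (Word.part .w8 x))).toNat < 256          (`movzx eax, al`)
      readLE1_lt f a, rd1_lt, rd_lt   f.readLE a 1 < 256; rd mem a 1 < 256; rd mem a n < 2 ^ (8 n)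
      bv32_and_le x m                 (x &&& m).toNat ≤ m.toNat                                           (`and r32, mask`)
      bv32_and_le_left x m            (x &&& m).toNat ≤ x.toNat
      word_and_le w m                 (w &&& m).toNat ≤ m.toNat                                           (`and r64, mask`)
      bv32_and_lowmask x k            (x &&& BitVec.ofNat 32 (2 ^ k − 1)).toNat = x.toNat % 2 ^ k
      bv32_and_7 / _0xff / _0xfff     (x &&& 7#32).toNat = x.toNat % 8; … % 256; … % 4096
      bv32_and_0xfff_le               (x &&& 4095#32).toNat ≤ 4095
      bv32_and7_succ x                ((x &&& 7#32) + 1#32).toNat = x.toNat % 8 + 1; bv32_and7_succ_le: … ≤ 8       (`BitsPerPixel`)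
      two_pow_le_256 k                k ≤ 8 → 2 ^ k ≤ 256; one_shl_le_256: 1 <<< k ≤ 256 (Nat)
      bv32_one_shl_toNat k            k < 32 → (1#32 <<< k).toNat = 2 ^ k; bv32_one_shl_le_256: k ≤ 8 → … ≤ 256          (`1 << BitsPerPixel`)
      bv32_msb_false x                x.toNat < 2 ^ 31 → x.msb = false                                   (the `msb` atom of a `test ; jle` branch fact)
      bv32_signExtend_toNat x         x.toNat < 2 ^ 31 → (BitVec.signExtend 64 x).toNat = x.toNat        (`movsxd`, on the bit vector)
      toNat_ofBV64 x                  (Word.ofBV x).toNat = x.toNat for a 64-bit `x`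
      bv64_add_val c x                c + x.toNat < 2 ^ 64 → (BitVec.ofNat 64 c + x.toBitVec).toNat = c + x.toNat   (`add [m64], r64`)
  §5c gcc -Og FORMS MET IN THE LZW LOOP (a 32-bit local held in a whole register: the register's number is below 2 ^ 31)
      sext32_small x                  x.toNat < 2 ^ 31 → Word.ofBV (signExtend 64 (Word.part .w32 x)) = x                (`movsxd rbx, ebx`: a walker fact)
      part32_toInt_small x            x.toNat < 2 ^ 31 → (Word.part .w32 x).toInt = x.toNat                              (`cmp r32, imm ; setg`)
      toInt_nonneg y                  0 ≤ y.toInt → y.toInt = y.toNat ∧ y.toNat < 2 ^ 31                                 (after `cmp ; jle` bounded it below)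
      sext32_bv y                     y.toNat < 2 ^ 31 → Word.ofBV (signExtend 64 y) = UInt64.ofNat y.toNat              (`movsxd r64, r32` of any such value)
      lea32_succ x                    x.toNat + 1 < 2 ^ 32 → (Word.ofBV (setWidth 32 (x + 1).toBitVec)).toNat = x.toNat + 1   (`lea r32, [r + 1]`: `++i`)
      setcc_or_zero p q               ((if p then 1#8 else 0) ||| (if q then 1 else 0)).toNat = 0 ↔ ¬p ∧ ¬q              (`setcc ; setcc ; or ; jne`)
      setcc_or_ne_zero p q            ¬ (… ||| …).toNat = 0 ↔ p ∨ q
      setcc_and_zero p q              ((if p then 1#8 else 0) &&& (if q then 1 else 0)).toNat = 0 ↔ ¬(p ∧ q)             (`setcc ; setcc ; test ; je`)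
      setcc_and_ne_zero p q           ¬ (… &&& …).toNat = 0 ↔ p ∧ q
  §5d INDEXING AN ARRAY OF 56-BYTE (`SavedImage`) / 24-BYTE (`ExtensionBlock`) ELEMENTS (`n` = the index, a number below 2 ^ 31;
      `S n` = `Word.ofBV (signExtend 64 (BitVec.ofNat 32 n))`: `movsxd r64, [int field]` once the load is rewritten to the number;
      for `movsxd r64, r32` / `cdqe` of a register that holds `UInt64.ofNat n`, rewrite with `cnt32_sext` first and use the `word_` forms)
      word_times56 a n                UInt64.ofNat a + (UInt64.ofNat n * 8 − UInt64.ofNat n) * 8 = UInt64.ofNat (a + 56 n)   (`lea rax, [rdx*8] ; sub rax, rdx ; lea r, [base + rax*8]`)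
      word_times56_shl a n            (UInt64.ofNat n * 8 − UInt64.ofNat n) <<< 3 + UInt64.ofNat a = UInt64.ofNat (a + 56 n)  (`lea ; sub ; shl r, 3 ; add r, [m64]`)
      savedSlot_addr a n              UInt64.ofNat a + (S n * 8 − S n) * 8 = UInt64.ofNat (a + 56 n)      (`&SavedImages[n]`: `movsxd rdx, [m32]` in front of `word_times56`'s three)
      word_times24 a n                UInt64.ofNat a + (UInt64.ofNat n + UInt64.ofNat n * 2) * 8 = UInt64.ofNat (a + 24 n)   (`lea rax, [rax+rax*2] ; lea r, [base + rax*8]`)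
      extSlot_addr a n                UInt64.ofNat a + (S n + S n * 2) * 8 = UInt64.ofNat (a + 24 n)      (`&ExtensionBlocks[n]`: `movsxd rax, [m32]` in front of `word_times24`'s two)
  §5e WHOLE 64-BIT REGISTERS: A NUMBER AS A WORD, THE SIGNED 64-BIT TESTS
      Word.eq_ofNat_of_toNat h        w.toNat = n → w = UInt64.ofNat n                                    (an assertion says `(v.reg .r13).toNat = p`, the walker wants
                                      the EQUATION `c_r13 : v.reg .r13 = UInt64.ofNat p := Word.eq_ofNat_of_toNat h_r13`; namespace X86.Word: `open X86`)
      word_msb_false h                x.toBitVec.msb = false → x.toNat < 2 ^ 63                           (the branch fact of `test r64, r64 ; js` NOT taken)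
      word_sgt_lit c hc h             c < 2 ^ 63, (BitVec.ofNat 64 c).toInt < x.toBitVec.toInt → c < x.toNat ∧ x.toNat < 2 ^ 63
                                      (the branch fact of `cmp r64, imm ; jg` TAKEN: `word_sgt_lit 63 (by decide) hbr_<addr>`)
  §6  A NARROWER READ OF A WIDER STORE                                                                  namespace X86.User.Mem
      Mem.readLE_prefix f a k j       f.readLE a k = f.readLE a (k + j) % 256 ^ k
      Mem.readLE_writeLE_prefix       k ≤ n → (f.writeLE a n v).readLE a k = v % 256 ^ n % 256 ^ k
      Mem.readLE4_of_writeLE8         x < 2 ^ 32 → (f.writeLE a 8 x).readLE a 4 = x                       (`push r64 ; mov r32, [rsp]`)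
      Mem.readLE1_of_writeLE4         (f.writeLE a 4 v).readLE a 1 = v % 256                              (`mov [m], r32 ; movzx eax, byte [m]`)
      Mem.readLE1_of_readLE4_lt       f.readLE a 4 = x, x < 256 → f.readLE a 1 = x
      Mem.readLE4_of_readLE8_lt       f.readLE a 8 = x, x < 2 ^ 32 → f.readLE a 4 = x
      Gif.Spec.rd_prefix, rd1_of_rd4_lt, rd4_of_rd8_lt     the same for `rd mem a n`
  §7  THE WALKER'S SHADOW ADDRESSES                                                                     namespace Asan
      Asan.shadowAddr_granule_add g k shadowAddr (g + k) = UInt64.ofNat g + UInt64.ofNat (0xC00000 + k)   (`mov [r + 0xC00000 + k], imm`, r = g)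
      Asan.shadowAddr_of_granule g    UInt64.ofNat g + 12582912 = shadowAddr g
      Asan.fillMem_last               fillMem mem g v (k + 1) = (fillMem mem g v k).write (shadowAddr (g + k)) v

  HOW TO USE §4: the `Word` EQUATIONS (`cnt32_sext i hi`, `cnt32_part i`, `cnt32_ofBV i hi`) go into the facts list of the walker, so that
  every later address speaks of `UInt64.ofNat i`; the `toNat` / `toInt` forms are for `rw … at hbr_<addr>` (a branch hypothesis
  `(Word.part .w32 (UInt64.ofNat i)).toInt < (BitVec.ofNat 32 n).toInt`).
  No `sorry`, no axiom, no `bv_decide`, no `native_decide`.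
-/
import ProgX.Base.Spec.Basic
import Gif.Spec.Mem
namespace Gif.Spec
open X86 X86.User Asan ProgX

/-! ### §1 Signed 32-bit values -/

/-- The signed reading of a 32-bit value. A plain `if`, so that `omega` decides everything about it once it is unfolded; `sint32_cases` is
the unfolded form. -/
def sint32 (n : Nat) : Int := if n < 2147483648 then (n : Int) else (n : Int) - 4294967296

/-- Both cases of `sint32`, for `omega`. -/
theorem sint32_cases (n : Nat) :
    (n < 2147483648 ∧ sint32 n = n) ∨ (2147483648 ≤ n ∧ sint32 n = (n : Int) - 4294967296) := by
  unfold sint32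
  split <;> omega

/-- A number below `2 ^ 31` read as a signed 32-bit value is itself. -/
theorem sint32_of_lt (n : Nat) (h : n < 2 ^ 31) : sint32 n = (n : Int) := by
  have hc := sint32_cases n
  omega

/-- `sint32` is the two's-complement value of the 32-bit vector. -/
theorem toInt_ofNat32 (n : Nat) (h : n < 2 ^ 32) : (BitVec.ofNat 32 n).toInt = sint32 n := by
  rw [BitVec.toInt_eq_toNat_cond, BitVec.toNat_ofNat]
  have e : n % 2 ^ 32 = n := Nat.mod_eq_of_lt h
  rw [e]
  unfold sint32
  split <;> split <;> omega

/-- The signed value of the 32-bit part of a register, as `sint32` of its low half. -/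
theorem part32_toInt (x : Word) : (Word.part .w32 x).toInt = sint32 (x.toNat % 2 ^ 32) := by
  have e : Word.part .w32 x = BitVec.ofNat 32 (x.toNat % 2 ^ 32) := by
    apply BitVec.eq_of_toNat_eq
    unfold Word.part
    simp only [Width.bits, BitVec.toNat_setWidth, UInt64.toNat_toBitVec, BitVec.toNat_ofNat, Nat.mod_mod]
  rw [e]
  exact toInt_ofNat32 _ (Nat.mod_lt _ (by decide))

/-- The SIGNED value of the low 32 bits of a register: a C `int` argument or result, in the form of the walker's branch
hypotheses after a 32-bit signed comparison (`part32_toInt` turns it into `sint32`: `s32_eq_argInt`). Reducible. -/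
abbrev s32 (w : Word) : Int := (Word.part .w32 w).toInt

/-- The SIGNED value of a 64-bit register: a C `long` argument or result. -/
abbrev s64 (w : Word) : Int := (Word.part .w64 w).toInt

/-- The signed value of a 32-bit (`int`) argument register. -/
abbrev argInt (r : Word) : Int := sint32 (r.toNat % 2 ^ 32)

/-- The unsigned value of a 32-bit (`uint32`, or non-negative `int`) argument register. -/
abbrev argU32 (r : Word) : Nat := r.toNat % 2 ^ 32

/-- Unfolds `argInt` (then `sint32_cases` and `omega`). -/
theorem argInt_def (x : Word) : argInt x = sint32 (x.toNat % 2 ^ 32) := id rfl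

/-- The two signed views of a 32-bit argument agree. -/
theorem s32_eq_argInt (w : Word) : s32 w = argInt w :=
  part32_toInt w

/-- The 32-bit argument in a register, as a number: the low half. -/
def arg32 (u : State) (r : Reg) : Nat := (u.reg r).toNat % 2 ^ 32

/-- `arg32` unfolded (the form `u_omega` reads; also in the simp set `vspec`). -/
@[vspec] theorem arg32_def (u : State) (r : Reg) : arg32 u r = (u.reg r).toNat % 2 ^ 32 := id rfl

/- `arg32` is unfolded by its rewrite rule only: the frame tactics (`u_same`, `u_omega`) must see an ATOM, not `Nat.mod` applied to
a variable (evaluating it to weak head normal form does not terminate in practice). -/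
attribute [irreducible] arg32

/-- A 32-bit argument register holds the NEGATIVE `int` `−k`, `1 ≤ k ≤ 2 ^ 31`: its low half is the two's complement. -/
def IsNeg32 (u : State) (r : Reg) (k : Nat) : Prop := 1 ≤ k ∧ k ≤ 2 ^ 31 ∧ arg32 u r = 2 ^ 32 - k

/-! ### §2 32-bit `int` values in 64-bit pointer arithmetic: the walker's forms as numbers -/

/-- The 64-bit sign extension of a 32-bit value, as a number (`movsxd r64, r32`; `cdqe`). -/
theorem sext32_toNat (y : BitVec 32) :
    (Word.ofBV (BitVec.signExtend 64 y)).toNat = if y.toNat < 2 ^ 31 then y.toNat else y.toNat + (2 ^ 64 - 2 ^ 32) := by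
  unfold Word.ofBV
  rw [UInt64.toNat_ofBitVec, BitVec.setWidth_eq, BitVec.toNat_signExtend]
  simp only [BitVec.toNat_setWidth, BitVec.msb_eq_decide]
  have := y.isLt
  split <;> split <;> simp_all <;> omega

/-- **`movsxd r64, r32` / `cdqe` of a register whose low half is a non-negative `int`**: the low half. (The hypothesis is in the form of
giflib's contracts: `(u.reg .rdx).toNat % 2 ^ 32 = n ∧ n < 2 ^ 31`.) -/
theorem word32_sext (x : Word) (h : x.toNat % 2 ^ 32 < 2 ^ 31) :
    (Word.ofBV (BitVec.signExtend 64 (Word.part .w32 x))).toNat = x.toNat % 2 ^ 32 := by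
  rw [sext32_toNat, part32_toNat, if_pos h]

/-- **The low half of a register that is a non-negative `int`, read as a signed number** (what `cmp r32, … ; jl / jg` compares). -/
theorem word32_part_toInt (x : Word) (h : x.toNat % 2 ^ 32 < 2 ^ 31) :
    (Word.part .w32 x).toInt = ((x.toNat % 2 ^ 32 : Nat) : Int) := by
  rw [part32_toInt]
  exact sint32_of_lt _ h

/-- **`sar r32, s` of a register whose low half is a non-negative `int`** is the division by `2 ^ s` (the upper half of the result is 0). -/
theorem word32_sar (x : Word) (s : Nat) (h : x.toNat % 2 ^ 32 < 2 ^ 31) :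
    (Word.ofBV ((Word.part .w32 x).sshiftRight s)).toNat = x.toNat % 2 ^ 32 / 2 ^ s := by
  have hm : (Word.part .w32 x).msb = false := by
    rw [BitVec.msb_eq_decide, part32_toNat]
    simp only [decide_eq_false_iff_not, Nat.not_le]
    omega
  unfold Word.ofBV
  rw [UInt64.toNat_ofBitVec, BitVec.toNat_setWidth, BitVec.toNat_sshiftRight_of_msb_false hm, part32_toNat,
    Nat.shiftRight_eq_div_pow]
  apply Nat.mod_eq_of_lt
  have : x.toNat % 2 ^ 32 / 2 ^ s ≤ x.toNat % 2 ^ 32 := Nat.div_le_self _ _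
  omega

/-- **`movsxd` of a non-negative `int` argument** is the argument. -/
theorem arg32_sext (u : State) (r : Reg) (h : arg32 u r < 2 ^ 31) :
    (Word.ofBV (BitVec.signExtend 64 (Word.part .w32 (u.reg r)))).toNat = arg32 u r := by
  rw [arg32_def] at h ⊢
  exact word32_sext (u.reg r) h

/-- **`movsxd` of the negative `int` argument `−k`** is `2⁶⁴ − k`: adding it to a pointer subtracts `k`. -/
theorem IsNeg32.sext {u : State} {r : Reg} {k : Nat} (h : IsNeg32 u r k) :
    (Word.ofBV (BitVec.signExtend 64 (Word.part .w32 (u.reg r)))).toNat = 2 ^ 64 - k := by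
  obtain ⟨h1, h2, h3⟩ := h
  rw [arg32_def] at h3
  rw [sext32_toNat, part32_toNat, h3, if_neg (by omega)]
  omega

/-- **`sar r32, s` of a non-negative `int` argument** is the division by `2 ^ s` (and the upper half of the register is 0). -/
theorem arg32_sar (u : State) (r : Reg) (s : Nat) (h : arg32 u r < 2 ^ 31) :
    (Word.ofBV ((Word.part .w32 (u.reg r)).sshiftRight s)).toNat = arg32 u r / 2 ^ s := by
  rw [arg32_def] at h ⊢
  exact word32_sar (u.reg r) s h

/-- **A pointer plus 4 × a negative `int`** (`lea r, [p + y*4]` with `y` = the sign extension of `−k`): `p − 4 k`, when that is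
not negative. -/
theorem add_neg_mul4 (p y : Word) (k : Nat) (hy : y.toNat = 2 ^ 64 - k) (hk1 : 1 ≤ k) (hk : 4 * k ≤ p.toNat) :
    (p + y * 4).toNat = p.toNat - 4 * k := by
  have hp := p.toNat_lt
  have e4 : (4 : Word).toNat = 4 := rfl
  rw [UInt64.toNat_add, UInt64.toNat_mul, hy, e4]
  omega

/-- **A pointer plus 4 × a non-negative `int`** (`lea r, [p + x*4]`), when nothing wraps. -/
theorem add_mul4 (p x : Word) (i : Nat) (hx : x.toNat = i) (hi : p.toNat + 4 * i < 2 ^ 64) :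
    (p + x * 4).toNat = p.toNat + 4 * i := by
  have e4 : (4 : Word).toNat = 4 := rfl
  rw [UInt64.toNat_add, UInt64.toNat_mul, hx, e4]
  omega

/-- **A pointer plus 8 × a non-negative `int`** (`lea r, [p + x*8]`), when nothing wraps. -/
theorem add_mul8 (p x : Word) (i : Nat) (hx : x.toNat = i) (hi : p.toNat + 8 * i < 2 ^ 64) :
    (p + x * 8).toNat = p.toNat + 8 * i := by
  have e8 : (8 : Word).toNat = 8 := rfl
  rw [UInt64.toNat_add, UInt64.toNat_mul, hx, e8]
  omega

/-! ### §3 The bit-level forms the walker leaves, as numbers -/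

/-- A field of `*p` as the walker's load reads it (`mov r, [rdi + k]` leaves `u.mem.readLE (u.reg .rdi + k) n`) is the read `rd` of
Gif/Spec/Mem.lean at the number `p + k`. -/
theorem readLE_field (mem : Mem) (w : Word) (k n : Nat) :
    mem.readLE (w + UInt64.ofNat k) n = rd mem (w.toNat + k) n := by
  unfold rd
  rw [UInt64.ofNat_add, UInt64.ofNat_toNat]

/-- A non-negative `int` sign-extended into a 64-bit register (`movsxd`, `cdqe`) is the number itself. -/
theorem toNat_sext32 (x : BitVec 32) (h : x.toNat < 2 ^ 31) : (Word.ofBV (BitVec.signExtend 64 x)).toNat = x.toNat := by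
  rw [sext32_toNat, if_pos h]

/-- A non-negative `int` read as a signed number (the walker's form of a signed compare) is the number itself. -/
theorem toInt_of_lt (x : BitVec 32) (h : x.toNat < 2 ^ 31) : x.toInt = (x.toNat : Int) := by
  rw [BitVec.toInt_eq_toNat_cond]
  have : 2 * x.toNat < 2 ^ 32 := by omega
  simp only [this, if_true]

/-- A number below 2^32 as a 32-bit vector. -/
theorem toNat_ofNat32 (n : Nat) (h : n < 2 ^ 32) : (BitVec.ofNat 32 n).toNat = n := by
  rw [BitVec.toNat_ofNat]
  exact Nat.mod_eq_of_lt h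

/-- A dword below `2 ^ 32` zero-extended into a 64-bit register (`mov r32, [m32]`), as a number (`ProgX.toNat_ofBV32` composed with
`toNat_ofNat32`; `cnt32_ofBV` is the `Word` equation). -/
theorem toNat_ofBV_ofNat32 (n : Nat) (h : n < 2 ^ 32) : (Word.ofBV (BitVec.ofNat 32 n)).toNat = n := by
  rw [toNat_ofBV32, toNat_ofNat32 n h]

/-- The 32-bit difference of two numbers in order (`sub r32, [m32]`). -/
theorem toNat_sub32 (a b : Nat) (h : b ≤ a) (ha : a < 2 ^ 32) : (BitVec.ofNat 32 a - BitVec.ofNat 32 b).toNat = a - b := by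
  rw [BitVec.toNat_sub, BitVec.toNat_ofNat, BitVec.toNat_ofNat]
  have e1 : a % 2 ^ 32 = a := Nat.mod_eq_of_lt ha
  have e2 : b % 2 ^ 32 = b := Nat.mod_eq_of_lt (by omega)
  rw [e1, e2]
  omega

/-- The walker's form of `lea r32, [r14 + r12 + 0x20]`: the low half of the 64-bit sum of two zero-extended 32-bit values and 32. -/
theorem toNat_lea32 (x y : BitVec 32) :
    (BitVec.setWidth 32 (Word.ofBV x + Word.ofBV y + 32).toBitVec).toNat = (x.toNat + y.toNat + 32) % 2 ^ 32 := by
  have e32 : (32 : Word).toNat = 32 := rfl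
  rw [BitVec.toNat_setWidth, UInt64.toNat_toBitVec, UInt64.toNat_add, UInt64.toNat_add, toNat_ofBV32, toNat_ofBV32, e32]
  have := x.isLt
  have := y.isLt
  omega

/-! ### §4 32-bit counters and small `int` locals

  A C `int` loop counter (`for (int i = 0; i < n; ++i)`) or a small `int` local is generalised in a proof as the word `UInt64.ofNat i` with
  `i < 2 ^ 31`. The walker then leaves these forms:

      Word.part .w32 (UInt64.ofNat i)                                        the register's low half      cnt32_part  cnt32_part_toNat  cnt32_part_toInt
      BitVec.ofNat 32 i                                                      a dword loaded from a slot   cnt32_toInt  cnt32_ofBV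
      Word.ofBV (BitVec.signExtend 64 (Word.part .w32 (UInt64.ofNat i)))     `movsxd r64, r32`            cnt32_sext  cnt32_sext_toNat  (cnt32_sext_bv for a slot)
      Word.ofBV (Word.part .w32 (UInt64.ofNat i) + 1#32)                     `add r32, 1`                 cnt32_succ  (cnt32_succ_bv for a slot, cnt32_add for `+ c`)
      p + Word.ofBV (BitVec.signExtend 64 (Word.part .w32 (UInt64.ofNat i))) * 4   `lea [p + rax*4]`      cnt32_elem4  cnt32_elem8
      BitVec.ofNat 32 (x.toNat % 4294967296)                                 a dword spilled and reloaded bv32_reload_eq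
-/

/-- The low half of a register that holds the number `i`, as a 32-bit vector: `BitVec.ofNat 32 i` (no bound needed: `2 ^ 32` divides `2 ^ 64`). -/
theorem cnt32_part (i : Nat) : Word.part .w32 (UInt64.ofNat i) = BitVec.ofNat 32 i := by
  apply BitVec.eq_of_toNat_eq
  have e : (BitVec.ofNat 32 i).toNat = i % 2 ^ 32 := BitVec.toNat_ofNat i 32
  have e2 : i % 2 ^ 64 % 2 ^ 32 = i % 2 ^ 32 := by omega
  rw [toNat_part32, UInt64.toNat_ofNat']
  exact e2.trans e.symm

/-- The low half of a register that holds a number below `2 ^ 32`, as a number. -/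
theorem cnt32_part_toNat (i : Nat) (h : i < 2 ^ 32) : (Word.part .w32 (UInt64.ofNat i)).toNat = i := by
  rw [toNat_part32, UInt64.toNat_ofNat']
  omega

/-- A number below `2 ^ 31` as a signed 32-bit value is itself. -/
theorem cnt32_toInt (i : Nat) (h : i < 2 ^ 31) : (BitVec.ofNat 32 i).toInt = (i : Int) := by
  have e : (BitVec.ofNat 32 i).toNat = i := toNat_ofNat32 i (by omega)
  rw [toInt_of_lt _ (by omega), e]

/-- The low half of a register that holds a number below `2 ^ 31`, read as a signed number: what a `cmp r32, …; jl/jg` compares. -/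
theorem cnt32_part_toInt (i : Nat) (h : i < 2 ^ 31) : (Word.part .w32 (UInt64.ofNat i)).toInt = (i : Int) := by
  rw [cnt32_part, cnt32_toInt i h]

/-- **`cmp r32, r32 ; jg / jl` on two counters** (the walker's branch fact as it stands, both registers given as `UInt64.ofNat`): the
signed 32-bit comparison of two numbers below `2 ^ 31` is the comparison of the numbers. Facts in the walker's list do not rewrite a
branch fact: state `hlt : i < c := (cnt32_slt_iff i c hi hc).mp hbr_<addr>` in every goal behind the branch (`.not.mp` for the other arm). -/
theorem cnt32_slt_iff (i c : Nat) (hi : i < 2 ^ 31) (hc : c < 2 ^ 31) :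
    (Word.part .w32 (UInt64.ofNat i)).toInt < (Word.part .w32 (UInt64.ofNat c)).toInt ↔ i < c := by
  rw [cnt32_part_toInt i hi, cnt32_part_toInt c hc]
  omega

/-- A dword below `2 ^ 32` written to a 64-bit register (`mov r32, [m32]`, zero-extended) is the number. -/
theorem cnt32_ofBV (i : Nat) (h : i < 2 ^ 32) : Word.ofBV (BitVec.ofNat 32 i) = UInt64.ofNat i := by
  apply UInt64.toNat_inj.mp
  rw [toNat_ofBV32, BitVec.toNat_ofNat, UInt64.toNat_ofNat']
  omega

/-- `movsxd r64, [m32]` of a dword below `2 ^ 31`: the number. -/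
theorem cnt32_sext_bv (i : Nat) (h : i < 2 ^ 31) : Word.ofBV (BitVec.signExtend 64 (BitVec.ofNat 32 i)) = UInt64.ofNat i := by
  have e : (BitVec.ofNat 32 i).toNat = i := toNat_ofNat32 i (by omega)
  apply UInt64.toNat_inj.mp
  rw [toNat_sext32 _ (by omega), e, UInt64.toNat_ofNat']
  omega

/-- `movsxd r64, r32` of a register that holds a number below `2 ^ 31`: the same register value. THE rewrite rule for the facts list of
the walker. -/
theorem cnt32_sext (i : Nat) (h : i < 2 ^ 31) :
    Word.ofBV (BitVec.signExtend 64 (Word.part .w32 (UInt64.ofNat i))) = UInt64.ofNat i := by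
  rw [cnt32_part, cnt32_sext_bv i h]

/-- The `toNat` form of `cnt32_sext`. -/
theorem cnt32_sext_toNat (i : Nat) (h : i < 2 ^ 31) :
    (Word.ofBV (BitVec.signExtend 64 (Word.part .w32 (UInt64.ofNat i)))).toNat = i := by
  rw [cnt32_sext i h, UInt64.toNat_ofNat']
  omega

/-- `add dword [m32], 1` / `add r32, 1` on a 32-bit vector that is a number. -/
theorem cnt32_succ_bv (i : Nat) : BitVec.ofNat 32 i + 1#32 = BitVec.ofNat 32 (i + 1) := by
  rw [BitVec.ofNat_add]

/-- The number after `add dword [m32], 1`. -/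
theorem cnt32_succ_bv_toNat (i : Nat) (h : i + 1 < 2 ^ 32) : (BitVec.ofNat 32 i + 1#32).toNat = i + 1 := by
  rw [cnt32_succ_bv, toNat_ofNat32 (i + 1) h]

/-- `add r32, c` on a register that holds a number: the sum (no wrap). -/
theorem cnt32_add (i c : Nat) (h : i + c < 2 ^ 32) :
    Word.ofBV (Word.part .w32 (UInt64.ofNat i) + BitVec.ofNat 32 c) = UInt64.ofNat (i + c) := by
  rw [cnt32_part, ← BitVec.ofNat_add, cnt32_ofBV (i + c) h]

/-- `++i` (`add r32, 1`) on a register that holds the counter `i`: the register holds `i + 1`. The latch of every counted loop. -/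
theorem cnt32_succ (i : Nat) (h : i + 1 < 2 ^ 32) :
    Word.ofBV (Word.part .w32 (UInt64.ofNat i) + 1#32) = UInt64.ofNat (i + 1) :=
  cnt32_add i 1 h

/-- `&p[i]` for 4-byte elements (`movsxd rax, r32 ; lea r, [p + rax*4]`) with the counter `i` in the register: `p + 4 i`. -/
theorem cnt32_elem4 (p : Word) (i : Nat) (hi : i < 2 ^ 31) (hp : p.toNat + 4 * i < 2 ^ 64) :
    (p + Word.ofBV (BitVec.signExtend 64 (Word.part .w32 (UInt64.ofNat i))) * 4).toNat = p.toNat + 4 * i :=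
  add_mul4 p _ i (cnt32_sext_toNat i hi) hp

/-- `&p[i]` for 8-byte elements (`movsxd rax, r32 ; lea r, [p + rax*8]`): `p + 8 i`. -/
theorem cnt32_elem8 (p : Word) (i : Nat) (hi : i < 2 ^ 31) (hp : p.toNat + 8 * i < 2 ^ 64) :
    (p + Word.ofBV (BitVec.signExtend 64 (Word.part .w32 (UInt64.ofNat i))) * 8).toNat = p.toNat + 8 * i :=
  add_mul8 p _ i (cnt32_sext_toNat i hi) hp

/-- A dword spilled to the stack and reloaded through a register (`mov [rsp+8], edx … movsxd rax, [rsp+8]`): the walker's form of the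
reloaded value is the value. (`UserX.bv32_ofNat_toNat` is the form without the `%`.) -/
theorem bv32_reload_eq (x : BitVec 32) : BitVec.ofNat 32 (x.toNat % 4294967296) = x := by
  apply BitVec.eq_of_toNat_eq
  rw [BitVec.toNat_ofNat]
  omega

/-- The signed value of a 32-bit quantity, by cases: what turns a `.toInt` branch hypothesis into arithmetic for `omega`. -/
theorem bv32_toInt_cases (x : BitVec 32) :
    (x.toNat < 2 ^ 31 ∧ x.toInt = (x.toNat : Int)) ∨ (2 ^ 31 ≤ x.toNat ∧ x.toInt = (x.toNat : Int) - 2 ^ 32) := by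
  rw [BitVec.toInt_eq_toNat_cond]
  have := x.isLt
  split
  · left
    omega
  · right
    omega

/-- A 32-bit result written to a 64-bit register is below `2 ^ 32` (a post `rax < 2 ^ 32`; `ProgX.toNat_ofBV32` is the equation). -/
theorem ofBV32_toNat_lt (x : BitVec 32) : (Word.ofBV x).toNat < 2 ^ 32 := by
  rw [toNat_ofBV32]
  exact x.isLt

/-- `(w − k).toNat = w.toNat − k` for a number `k` not above `w` (`rsp − 3000`, a slot address). -/
theorem word_sub_toNat_le (w : Word) (k : Nat) (hk : k ≤ w.toNat) : (w - UInt64.ofNat k).toNat = w.toNat - k := by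
  have hlt : k < 2 ^ 64 := by
    have := w.toNat_lt
    omega
  have hle : UInt64.ofNat k ≤ w := by
    rw [UInt64.le_iff_toNat_le, UInt64.toNat_ofNat', Nat.mod_eq_of_lt hlt]
    exact hk
  rw [UInt64.toNat_sub_of_le _ _ hle, UInt64.toNat_ofNat', Nat.mod_eq_of_lt hlt]

/-- `movsxd r, r32 ; shl r, k` of a register whose value is a non-negative `int` (`x < 2 ^ 31`), as a number: `x · 2 ^ k` (`k ≤ 5`:
strides 2 … 32). -/
theorem cnt32_sext_shl (x : Word) (k : Nat) (hk : k ≤ 5) (h : x.toNat < 2 ^ 31) :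
    (Word.ofBV (BitVec.signExtend 64 (Word.part .w32 x)) <<< (UInt64.ofNat k)).toNat = x.toNat * 2 ^ k := by
  have hp : (Word.part .w32 x).toNat = x.toNat := by
    rw [toNat_part32]
    omega
  have hs := toNat_sext32 (Word.part .w32 x) (by omega)
  rw [hp] at hs
  have hk64 : (UInt64.ofNat k).toNat % 64 = k := by
    rw [UInt64.toNat_ofNat']
    omega
  rw [UInt64.toNat_shiftLeft, hs, hk64, Nat.shiftLeft_eq]
  have h2 : 2 ^ k ≤ 2 ^ 5 := Nat.pow_le_pow_right (by decide) hk
  have h3 : x.toNat * 2 ^ k ≤ x.toNat * 2 ^ 5 := Nat.mul_le_mul_left _ h2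
  apply Nat.mod_eq_of_lt
  omega

/-- `movsxd rax, [m32] ; shl rax, 2` for a non-negative `int` `m` loaded from a slot: the byte offset `4 m`. -/
theorem cnt32_sext_bv_shl2 (m : Nat) (h : m < 2 ^ 31) :
    (Word.ofBV (BitVec.signExtend 64 (BitVec.ofNat 32 m)) <<< 2).toNat = 4 * m := by
  have e3 : (2 : UInt64).toNat % 64 = 2 := by decide
  rw [cnt32_sext_bv m h, UInt64.toNat_shiftLeft, UInt64.toNat_ofNat', e3, Nat.shiftLeft_eq]
  omega

/-- A number below `2 ^ 31` in a register, read as an `int` argument (`argInt`): the number. -/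
theorem cnt32_argInt (i : Nat) (h : i < 2 ^ 31) : argInt (UInt64.ofNat i) = (i : Int) := by
  have e : (UInt64.ofNat i).toNat % 2 ^ 32 = i := by
    rw [UInt64.toNat_ofNat']
    omega
  unfold argInt
  rw [e]
  have hc := sint32_cases i
  omega

/-- `mov r32, 0xffffffff`: the `int` −1. -/
theorem argInt_neg_one : argInt (Word.ofBV 0xffffffff#32) = -1 := by
  decide

/-! ### §5 What giflib's code needs in addition -/

/-- **A signed compare of two non-negative `int`s is the unsigned one** (`cmp r32, r/m32 ; jl`: the walker's branch hypothesis is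
`x.toInt < y.toInt`). -/
theorem toInt_lt_iff_of_lt (x y : BitVec 32) (hx : x.toNat < 2 ^ 31) (hy : y.toNat < 2 ^ 31) :
    x.toInt < y.toInt ↔ x.toNat < y.toNat := by
  rw [toInt_of_lt x hx, toInt_of_lt y hy]
  omega

/-- The same for `≤` (`jle`, `jge`, and the negations `¬ x.toInt < y.toInt`). -/
theorem toInt_le_iff_of_lt (x y : BitVec 32) (hx : x.toNat < 2 ^ 31) (hy : y.toNat < 2 ^ 31) :
    x.toInt ≤ y.toInt ↔ x.toNat ≤ y.toNat := by
  rw [toInt_of_lt x hx, toInt_of_lt y hy]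
  omega

/-- **`movzx r32, byte [m]`** with `n` the byte the load read (`n = u.mem.readLE a 1`): the register, as a number. -/
theorem movzx8_toNat (n : Nat) : (Word.ofBV (BitVec.zeroExtend 32 (BitVec.ofNat 8 n))).toNat = n % 256 := by
  rw [toNat_ofBV32]
  simp only [BitVec.toNat_setWidth, BitVec.truncate_eq_setWidth, BitVec.toNat_ofNat]
  omega

/-- `movzx r32, byte [m]` leaves a number below 256 in the 64-bit register. -/
theorem movzx8_lt (n : Nat) : (Word.ofBV (BitVec.zeroExtend 32 (BitVec.ofNat 8 n))).toNat < 256 := by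
  rw [movzx8_toNat]
  omega

/-- `movzx r32, byte [m]` of a byte value, as a `Word` equation (for the walker's facts list). -/
theorem movzx8_of_lt (n : Nat) (h : n < 256) : Word.ofBV (BitVec.zeroExtend 32 (BitVec.ofNat 8 n)) = UInt64.ofNat n := by
  apply UInt64.toNat_inj.mp
  rw [movzx8_toNat, UInt64.toNat_ofNat']
  omega

/-- One byte of memory is below 256. -/
theorem readLE1_lt (f : Mem) (a : Word) : f.readLE a 1 < 256 := by
  rw [Mem.readLE_one]
  exact UInt8.toNat_lt _

/-- `movzx r32, byte [m]`: the register is the byte at `m`. -/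
theorem movzx8_readLE (f : Mem) (a : Word) :
    (Word.ofBV (BitVec.zeroExtend 32 (BitVec.ofNat 8 (f.readLE a 1)))).toNat = f.readLE a 1 := by
  rw [movzx8_toNat]
  exact Nat.mod_eq_of_lt (readLE1_lt f a)

/-- `movzx eax, al` (register to register): the whole of rax is a byte. -/
theorem movzx8_reg_lt (x : Word) : (Word.ofBV (BitVec.zeroExtend 32 (Word.part .w8 x))).toNat < 256 := by
  unfold Word.ofBV Word.part
  simp only [UInt64.toNat_ofBitVec, Width.bits, BitVec.toNat_setWidth, UInt64.toNat_toBitVec, BitVec.truncate_eq_setWidth]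
  omega

/-- A value of `n` bytes is below `2 ^ (8 n)`. -/
theorem rd_lt (mem : Mem) (a n : Nat) : rd mem a n < 2 ^ (8 * n) := by
  unfold rd
  exact Mem.readLE_lt mem _ n

/-- One byte read at a number is below 256. -/
theorem rd1_lt (mem : Mem) (a : Nat) : rd mem a 1 < 256 := by
  unfold rd
  exact readLE1_lt mem _

/-- **A masked value is at most the mask** (`and r32, mask`). -/
theorem bv32_and_le (x m : BitVec 32) : (x &&& m).toNat ≤ m.toNat := by
  rw [BitVec.toNat_and]
  exact Nat.and_le_right

/-- A masked value is at most the value. -/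
theorem bv32_and_le_left (x m : BitVec 32) : (x &&& m).toNat ≤ x.toNat := by
  rw [BitVec.toNat_and]
  exact Nat.and_le_left

/-- A masked 64-bit value is at most the mask (`and r64, mask`). -/
theorem word_and_le (w m : Word) : (w &&& m).toNat ≤ m.toNat := by
  rw [UInt64.toNat_and]
  exact Nat.and_le_right

/-- **A low mask is a remainder**: `x & (2 ^ k − 1) = x mod 2 ^ k`. The instances for the masks of giflib follow. -/
theorem bv32_and_lowmask (x : BitVec 32) (k : Nat) (hk : k ≤ 32) :
    (x &&& BitVec.ofNat 32 (2 ^ k - 1)).toNat = x.toNat % 2 ^ k := by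
  have h1 : 2 ^ k ≤ 2 ^ 32 := Nat.pow_le_pow_right (by decide) hk
  have h2 : 0 < 2 ^ k := Nat.two_pow_pos k
  have e : (2 ^ k - 1) % 2 ^ 32 = 2 ^ k - 1 := Nat.mod_eq_of_lt (by omega)
  rw [BitVec.toNat_and, BitVec.toNat_ofNat, e, Nat.and_two_pow_sub_one_eq_mod]

/-- `and r32, 7`. -/
theorem bv32_and_7 (x : BitVec 32) : (x &&& 7#32).toNat = x.toNat % 8 :=
  bv32_and_lowmask x 3 (by decide)

/-- `and r32, 0xff`. -/
theorem bv32_and_0xff (x : BitVec 32) : (x &&& 255#32).toNat = x.toNat % 256 :=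
  bv32_and_lowmask x 8 (by decide)

/-- `and r32, 0xfff` (an LZW code as a table index). -/
theorem bv32_and_0xfff (x : BitVec 32) : (x &&& 4095#32).toNat = x.toNat % 4096 :=
  bv32_and_lowmask x 12 (by decide)

/-- `and r32, 0xfff` is at most 4095 (`LZ_MAX_CODE`). -/
theorem bv32_and_0xfff_le (x : BitVec 32) : (x &&& 4095#32).toNat ≤ 4095 := by
  rw [bv32_and_0xfff]
  omega

/-- **`(x & 7) + 1`** (`BitsPerPixel = (Buf[0] & 0x07) + 1`), as a number. -/
theorem bv32_and7_succ (x : BitVec 32) : ((x &&& 7#32) + 1#32).toNat = x.toNat % 8 + 1 := by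
  have e1 : (1#32).toNat = 1 := by decide
  rw [BitVec.toNat_add, bv32_and_7, e1]
  omega

/-- `(x & 7) + 1 ≤ 8`. -/
theorem bv32_and7_succ_le (x : BitVec 32) : ((x &&& 7#32) + 1#32).toNat ≤ 8 := by
  rw [bv32_and7_succ]
  omega

/-- `2 ^ k ≤ 256` for `k ≤ 8` (`1 << BitsPerPixel`: the colour count). -/
theorem two_pow_le_256 (k : Nat) (hk : k ≤ 8) : 2 ^ k ≤ 256 := by
  have h : 2 ^ k ≤ 2 ^ 8 := Nat.pow_le_pow_right (by decide) hk
  omega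

/-- `1 <<< k ≤ 256` for `k ≤ 8`, as numbers. -/
theorem one_shl_le_256 (k : Nat) (hk : k ≤ 8) : 1 <<< k ≤ 256 := by
  rw [Nat.shiftLeft_eq, Nat.one_mul]
  exact two_pow_le_256 k hk

/-- `1 << k` in a 32-bit register (`mov r32, 1 ; shl r32, cl`), as a number. -/
theorem bv32_one_shl_toNat (k : Nat) (hk : k < 32) : (1#32 <<< k).toNat = 2 ^ k := by
  have e1 : (1#32).toNat = 1 := by decide
  have h : 2 ^ k < 2 ^ 32 := Nat.pow_lt_pow_right (by decide) hk
  rw [BitVec.toNat_shiftLeft, e1, Nat.shiftLeft_eq, Nat.one_mul]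
  exact Nat.mod_eq_of_lt h

/-- `1 << k ≤ 256` in a 32-bit register for `k ≤ 8`. -/
theorem bv32_one_shl_le_256 (k : Nat) (hk : k ≤ 8) : (1#32 <<< k).toNat ≤ 256 := by
  rw [bv32_one_shl_toNat k (by omega)]
  exact two_pow_le_256 k hk

/-! ### 5b. More walker forms (from the validation of `mem_read`) -/

/-- A 32-bit value below `2 ^ 31` has no top bit (the `msb` atom of a `test e?x, e?x ; jle` branch fact). -/
theorem bv32_msb_false (x : BitVec 32) (h : x.toNat < 2 ^ 31) : x.msb = false := by
  rw [BitVec.msb_eq_decide]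
  simp only [decide_eq_false_iff_not]
  omega

/-- **`movsxd r64, r32` of a value below `2 ^ 31`**, on the bit vector: the sign extension is that value. -/
theorem bv32_signExtend_toNat (x : BitVec 32) (h : x.toNat < 2 ^ 31) : (BitVec.signExtend 64 x).toNat = x.toNat := by
  have hmsb : x.msb = false := bv32_msb_false x h
  rw [BitVec.toNat_signExtend, hmsb]
  simp only [BitVec.toNat_setWidth, Bool.false_eq_true, if_false]
  omega

/-- A 64-bit bit vector as a word keeps its number. -/
theorem toNat_ofBV64 (x : BitVec 64) : (Word.ofBV x).toNat = x.toNat := by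
  unfold Word.ofBV
  simp only [UInt64.toNat_ofBitVec, BitVec.toNat_setWidth]
  omega

/-- **`add [m64], r64`** after the load was rewritten to a number `c`: the stored value, when nothing wraps. -/
theorem bv64_add_val (c : Nat) (x : Word) (h : c + x.toNat < 2 ^ 64) : (BitVec.ofNat 64 c + x.toBitVec).toNat = c + x.toNat := by
  rw [BitVec.toNat_add, BitVec.toNat_ofNat, UInt64.toNat_toBitVec]
  omega

/-! ### §5c gcc -Og forms met in the LZW loop

  gcc keeps a small `int` local (`StackPtr`, `i`, `ClearCode`) in a register that a 32-bit `mov` / `lea` wrote: the upper half is 0, and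
  the assertions speak of THE WHOLE REGISTER (`(v.reg .rbx).toNat ≤ 4095`). The lemmas of §2 state the same facts with
  `x.toNat % 2 ^ 32` (the form of a contract's argument); these are the forms without the `%`, as the walker shows them for such a
  register, and the byte that two `setcc` and an `or` / `test` leave for the branch. -/

/-- **`movsxd r64, r32` of a register that holds a non-negative `int`** (the whole register is a number below `2 ^ 31`): the register
itself. A `Word` equation for the facts list of `u_walk` (`word32_sext` is its `toNat` form with `% 2 ^ 32`; `cnt32_sext` the form for
a generalised counter `UInt64.ofNat i`). -/
theorem sext32_small (x : Word) (h : x.toNat < 2 ^ 31) :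
    Word.ofBV (BitVec.signExtend 64 (Word.part .w32 x)) = x := by
  apply UInt64.toNat_inj.mp
  have hmod : x.toNat % 2 ^ 32 = x.toNat := Nat.mod_eq_of_lt (by omega)
  rw [word32_sext x (by omega), hmod]

/-- **The signed value of the low half of a register that holds a non-negative `int`**: the number (what `cmp r32, imm ; setg`
compares). `word32_part_toInt` is the form with `% 2 ^ 32`. -/
theorem part32_toInt_small (x : Word) (h : x.toNat < 2 ^ 31) : (Word.part .w32 x).toInt = (x.toNat : Int) := by
  have hmod : x.toNat % 2 ^ 32 = x.toNat := Nat.mod_eq_of_lt (by omega)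
  rw [word32_part_toInt x (by omega), hmod]

/-- **A 32-bit value whose signed value is not negative** (a signed compare bounded it below: `CrntPrefix > ClearCode ≥ 0`): the
signed value is the number, and the number is below `2 ^ 31`. The converse of `toInt_of_lt`. -/
theorem toInt_nonneg (y : BitVec 32) (h : 0 ≤ y.toInt) : y.toInt = (y.toNat : Int) ∧ y.toNat < 2 ^ 31 := by
  have hc := bv32_toInt_cases y
  omega

/-- **`movsxd r64, r32` of a 32-bit value below `2 ^ 31`** (a non-negative `int`): the number, as a `Word` equation for `rw … at w_<reg>`
(`toNat_sext32` is its `toNat` form; `cnt32_sext_bv` the form for `BitVec.ofNat 32 i`). -/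
theorem sext32_bv (y : BitVec 32) (h : y.toNat < 2 ^ 31) :
    Word.ofBV (BitVec.signExtend 64 y) = UInt64.ofNat y.toNat := by
  apply UInt64.toNat_inj.mp
  rw [toNat_sext32 y h, UInt64.toNat_ofNat']
  omega

/-- **`lea r32, [r + 1]`** (`++i`, `StackPtr++`) of a register that holds a number below `2 ^ 32 − 1`: the number plus one, as a number. -/
theorem lea32_succ (x : Word) (h : x.toNat + 1 < 2 ^ 32) :
    (Word.ofBV (BitVec.setWidth 32 (x + 1).toBitVec)).toNat = x.toNat + 1 := by
  have e1 : (1 : Word).toNat = 1 := rfl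
  rw [toNat_ofBV32, BitVec.toNat_setWidth, UInt64.toNat_toBitVec, UInt64.toNat_add, e1]
  omega

/-- **`setcc al ; setcc dl ; or al, dl ; jne`** (a C `a || b` of two compares): the byte is 0 exactly when both conditions fail. For the
branch fact `hbr_<addr> : (… ||| …).toNat = 0`. -/
theorem setcc_or_zero (p q : Prop) [Decidable p] [Decidable q] :
    ((if p then (1 : BitVec 8) else 0) ||| (if q then 1 else 0)).toNat = 0 ↔ ¬p ∧ ¬q := by
  by_cases hp : p
  · by_cases hq : q
    · simp only [hp, hq, if_true, not_true, and_self, iff_false]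
      decide
    · simp only [hp, hq, if_true, if_false, not_true, false_and, iff_false]
      decide
  · by_cases hq : q
    · simp only [hp, hq, if_true, if_false, not_true, and_false, iff_false]
      decide
    · simp only [hp, hq, if_false, not_false_eq_true, and_self, iff_true]
      decide

/-- **The other arm of `setcc ; setcc ; or ; jne`**: the byte is not 0 exactly when one of the conditions holds. For the branch fact
`hbr_<addr> : ¬ (… ||| …).toNat = 0`. -/
theorem setcc_or_ne_zero (p q : Prop) [Decidable p] [Decidable q] :
    ¬ ((if p then (1 : BitVec 8) else 0) ||| (if q then 1 else 0)).toNat = 0 ↔ p ∨ q := by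
  rw [setcc_or_zero p q]
  by_cases hp : p
  · simp only [hp, not_true, false_and, not_false_eq_true, true_or]
  · by_cases hq : q
    · simp only [hq, not_true, and_false, not_false_eq_true, or_true]
    · simp only [hp, hq, not_false_eq_true, and_self, not_true, or_self]

/-- **`setcc dl ; setcc al ; test dl, al ; je`** (a C `a && b` of two compares): the byte is 0 exactly when one of the two conditions
fails. For the branch fact `hbr_<addr> : (… &&& …).toNat = 0`. -/
theorem setcc_and_zero (p q : Prop) [Decidable p] [Decidable q] :
    ((if p then (1 : BitVec 8) else 0) &&& (if q then 1 else 0)).toNat = 0 ↔ ¬(p ∧ q) := by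
  by_cases hp : p
  · by_cases hq : q
    · simp only [hp, hq, if_true, and_self, not_true, iff_false]
      decide
    · simp only [hp, hq, if_true, if_false, and_false, not_false_eq_true, iff_true]
      decide
  · by_cases hq : q
    · simp only [hp, hq, if_true, if_false, false_and, not_false_eq_true, iff_true]
      decide
    · simp only [hp, hq, if_false, and_self, not_false_eq_true, iff_true]
      decide

/-- **The other arm of `setcc ; setcc ; test ; je`**: the byte is not 0 exactly when both conditions hold. For the branch fact
`hbr_<addr> : ¬ (… &&& …).toNat = 0`. -/
theorem setcc_and_ne_zero (p q : Prop) [Decidable p] [Decidable q] :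
    ¬ ((if p then (1 : BitVec 8) else 0) &&& (if q then 1 else 0)).toNat = 0 ↔ p ∧ q := by
  rw [setcc_and_zero p q]
  exact Classical.not_not

/-! ### §5d Indexing an array of 56-byte / 24-byte elements

  giflib indexes two arrays of structures by an `int`: `SavedImages` (56-byte `SavedImage`s) and `ExtensionBlocks` (24-byte
  `ExtensionBlock`s). gcc -Og multiplies by shifts: `× 56` is `(n·8 − n)·8`, `× 24` is `(n + n·2)·8`. The walker shows the address
  of the element as one of the word terms below; each lemma rewrites it to `UInt64.ofNat (a + size · n)`, a number `u_omega` reads.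

      `rw [savedSlot_addr s.arr init.length (by omega) (by omega)] at w_rbp`

  The index reaches the register by `movsxd r64, DWORD [m]` (`savedSlot_addr`, `extSlot_addr`: the load already rewritten to the
  number `n`), or by `movsxd r64, r32` / `cdqe` of a register that holds `UInt64.ofNat n` (rewrite with `cnt32_sext n hn` first: what
  is left is the `word_` form).
-/

/-- **`a + (n·8 − n)·8 = a + 56·n`** in 64-bit words: the address of element `n` of an array of 56-byte `SavedImage`s at `a`, as
`lea rax, [rdx*8] ; sub rax, rdx ; lea rbp, [rbp + rax*8]` computes it, when nothing wraps. -/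
theorem word_times56 (a n : Nat) (hn : n < 2 ^ 31) (ha : a + 56 * n < 2 ^ 64) :
    UInt64.ofNat a + (UInt64.ofNat n * 8 - UInt64.ofNat n) * 8 = UInt64.ofNat (a + 56 * n) := by
  apply UInt64.toNat_inj.mp
  have e8 : (8 : UInt64).toNat = 8 := rfl
  have hn' : n < 2147483648 := hn
  have ha' : a + 56 * n < 18446744073709551616 := ha
  rw [UInt64.toNat_add, UInt64.toNat_mul, UInt64.toNat_sub, UInt64.toNat_mul, e8]
  simp only [UInt64.toNat_ofNat']
  omega

/-- **`((n·8 − n) << 3) + a = a + 56·n`** in 64-bit words: the second shape of `word_times56`, for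
`lea rbp, [rax*8] ; sub rbp, rax ; shl rbp, 3 ; add rbp, QWORD [gif + 0x48]` (DGifDecreaseImageCounter at 10A487H, digest_file: the
array's address is ADDED from memory, so the product comes first; `a` is the number the load was rewritten to). -/
theorem word_times56_shl (a n : Nat) (hn : n < 2 ^ 31) (ha : a + 56 * n < 2 ^ 64) :
    (UInt64.ofNat n * 8 - UInt64.ofNat n) <<< 3 + UInt64.ofNat a = UInt64.ofNat (a + 56 * n) := by
  apply UInt64.toNat_inj.mp
  have e8 : (8 : UInt64).toNat = 8 := rfl
  have e3 : (3 : UInt64).toNat % 64 = 3 := by decide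
  have hn' : n < 2147483648 := hn
  have ha' : a + 56 * n < 18446744073709551616 := ha
  rw [UInt64.toNat_add, UInt64.toNat_shiftLeft, UInt64.toNat_sub, UInt64.toNat_mul, e8, e3, Nat.shiftLeft_eq]
  simp only [UInt64.toNat_ofNat']
  omega

/-- **The address of `SavedImages[n]`, exactly as the walker shows it** after `movsxd rdx, DWORD [gif + 0x20]` (the load rewritten
to the number `n = ImageCount`), `lea rax, [rdx*8]`, `sub rax, rdx`, `lea rbp, [rbp + rax*8]` (DGifDecreaseImageCounter,
DGifGetImageDesc, GifFreeSavedImages, DGifSlurp): `cnt32_sext_bv`, then `word_times56`. -/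
theorem savedSlot_addr (a n : Nat) (hn : n < 2 ^ 31) (ha : a + 56 * n < 2 ^ 64) :
    UInt64.ofNat a +
        (Word.ofBV (BitVec.signExtend 64 (BitVec.ofNat 32 n)) * 8 - Word.ofBV (BitVec.signExtend 64 (BitVec.ofNat 32 n))) * 8 =
      UInt64.ofNat (a + 56 * n) := by
  rw [cnt32_sext_bv n hn]
  exact word_times56 a n hn ha

/-- **`a + (n + n·2)·8 = a + 24·n`** in 64-bit words: the address of element `n` of an array of 24-byte `ExtensionBlock`s at `a`, as
`lea rax, [rax + rax*2] ; lea rbp, [r15 + rax*8]` computes it, when nothing wraps (digest_extensions and GifAddExtensionBlock, where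
the index comes by `movsxd rax, r12d` / `cdqe`: rewrite with `cnt32_sext` first). -/
theorem word_times24 (a n : Nat) (hn : n < 2 ^ 31) (ha : a + 24 * n < 2 ^ 64) :
    UInt64.ofNat a + (UInt64.ofNat n + UInt64.ofNat n * 2) * 8 = UInt64.ofNat (a + 24 * n) := by
  apply UInt64.toNat_inj.mp
  have e8 : (8 : UInt64).toNat = 8 := rfl
  have e2 : (2 : UInt64).toNat = 2 := rfl
  have hn' : n < 2147483648 := hn
  have ha' : a + 24 * n < 18446744073709551616 := ha
  rw [UInt64.toNat_add, UInt64.toNat_mul, UInt64.toNat_add, UInt64.toNat_mul, e8, e2]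
  simp only [UInt64.toNat_ofNat']
  omega

/-- **The address of `ExtensionBlocks[n]`, exactly as the walker shows it** after `movsxd rax, DWORD [r12]` (the load rewritten to
the number `n = ExtensionBlockCount`), `lea rax, [rax + rax*2]`, `lea rax, [r13 + rax*8]` (GifFreeExtensions: the end of the
array): `cnt32_sext_bv`, then `word_times24`. -/
theorem extSlot_addr (a n : Nat) (hn : n < 2 ^ 31) (ha : a + 24 * n < 2 ^ 64) :
    UInt64.ofNat a +
        (Word.ofBV (BitVec.signExtend 64 (BitVec.ofNat 32 n)) + Word.ofBV (BitVec.signExtend 64 (BitVec.ofNat 32 n)) * 2) * 8 =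
      UInt64.ofNat (a + 24 * n) := by
  rw [cnt32_sext_bv n hn]
  exact word_times24 a n hn ha

/-! ### §5e Whole 64-bit registers: a number as a word, the signed 64-bit tests -/

/-- **A register whose number is `n` IS the word `UInt64.ofNat n`**: an assertion states a register as `(v.reg .r13).toNat = p`, the
walker wants the equation (`c_r13 : v.reg .r13 = UInt64.ofNat p := Word.eq_ofNat_of_toNat h_r13`), so that every later address speaks
of `UInt64.ofNat p`. -/
theorem _root_.X86.Word.eq_ofNat_of_toNat {w : Word} {n : Nat} (h : w.toNat = n) : w = UInt64.ofNat n := by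
  rw [← h, UInt64.ofNat_toNat]

/-- **`test r64, r64 ; js` not taken** (the walker's branch fact `x.toBitVec.msb = false`): the number is below `2 ^ 63`, that is,
not negative as a signed 64-bit number. -/
theorem word_msb_false {x : Word} (h : x.toBitVec.msb = false) : x.toNat < 2 ^ 63 := by
  rw [BitVec.msb_eq_decide] at h
  have h' := of_decide_eq_false h
  have ex : x.toBitVec.toNat = x.toNat := rfl
  rw [ex] at h'
  omega

/-- **`cmp r64, c ; jg` taken** (SIGNED, 64 bits; `c` a small literal: the walker's branch fact is
`(BitVec.ofNat 64 c).toInt < x.toBitVec.toInt`, printed as `c#64`): the register is above `c` and not negative. -/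
theorem word_sgt_lit (c : Nat) (hc : c < 2 ^ 63) {x : Word} (h : (BitVec.ofNat 64 c).toInt < x.toBitVec.toInt) :
    c < x.toNat ∧ x.toNat < 2 ^ 63 := by
  rw [BitVec.toInt_eq_toNat_cond, BitVec.toInt_eq_toNat_cond, BitVec.toNat_ofNat] at h
  have ex : x.toBitVec.toNat = x.toNat := rfl
  rw [ex] at h
  have hx := x.toNat_lt
  have ec : c % 2 ^ 64 = c := Nat.mod_eq_of_lt (by omega)
  rw [ec] at h
  split at h <;> split at h <;> omega

end Gif.Spec

/-! ### §6 A narrower read of a wider store (namespace `X86.User.Mem`)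

  `mov [rsp+4], r8d … movzx eax, byte [rsp+4]` (an `int` spilled, its low byte reloaded), `push r ; mov eax, [rsp]` (a dword read of a
  pushed qword): neither the walker nor `u_read` / `u_resolve` reads a PREFIX of a store; the load stays `(nest).readLE a k` inside later
  values. Rewrite `w_mem` / the hypothesis with these.
-/
namespace X86.User.Mem

/-- The low `k` bytes of a little-endian read of `k + j` bytes. -/
theorem readLE_prefix (f : Mem) (a : Word) (k j : Nat) : f.readLE a k = f.readLE a (k + j) % 256 ^ k := by
  induction k generalizing a with
  | zero =>
    rw [Nat.pow_zero, Nat.mod_one]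
    rfl
  | succ k ih =>
    have e : k + 1 + j = (k + j) + 1 := by omega
    rw [e]
    simp only [Mem.readLE]
    rw [ih (a + 1), Nat.pow_succ, Nat.mul_comm (256 ^ k) 256, Nat.mod_mul]
    have hb : (f.read a).toNat < 256 := UInt8.toNat_lt _
    have e1 : ((f.read a).toNat + 256 * f.readLE (a + 1) (k + j)) % 256 = (f.read a).toNat := by
      omega
    have e2 : ((f.read a).toNat + 256 * f.readLE (a + 1) (k + j)) / 256 = f.readLE (a + 1) (k + j) := by
      omega
    rw [e1, e2]

/-- A `k`-byte read of an `n`-byte store at the same address, `k ≤ n`: the low `k` bytes of the stored value. -/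
theorem readLE_writeLE_prefix (f : Mem) (a : Word) (k n v : Nat) (hk : k ≤ n) (hn : n ≤ 2 ^ 64) :
    (f.writeLE a n v).readLE a k = v % 256 ^ n % 256 ^ k := by
  obtain ⟨j, rfl⟩ : ∃ j, n = k + j := ⟨n - k, by omega⟩
  rw [readLE_prefix _ a k j, Mem.readLE_writeLE_same _ _ _ _ hn]

/-- A dword read of a qword just stored at the same address (`push r64 ; mov r32, [rsp]`). -/
theorem readLE4_of_writeLE8 (f : Mem) (a : Word) (x : Nat) (hx : x < 2 ^ 32) : (f.writeLE a 8 x).readLE a 4 = x := by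
  rw [readLE_prefix _ a 4 4, Mem.readLE_writeLE_same _ _ _ _ (by decide)]
  omega

/-- A byte read of a dword just stored at the same address (`mov [m], r32 ; movzx eax, byte [m]`): the low byte. -/
theorem readLE1_of_writeLE4 (f : Mem) (a : Word) (v : Nat) : (f.writeLE a 4 v).readLE a 1 = v % 256 := by
  rw [readLE_prefix _ a 1 3, Mem.readLE_writeLE_same _ _ _ _ (by decide)]
  omega

/-- The low byte of a dword slot whose value is a byte (`movzx ecx, BYTE PTR [rbp-0x48]` of an `int` slot). -/
theorem readLE1_of_readLE4_lt (f : Mem) (a : Word) (x : Nat) (h : f.readLE a 4 = x) (hx : x < 256) : f.readLE a 1 = x := by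
  rw [readLE_prefix _ a 1 3, h]
  omega

/-- The low dword of a qword slot whose value is a dword (`mov eax, [rsp+8]` of a slot a `mov [rsp+8], rax` filled). -/
theorem readLE4_of_readLE8_lt (f : Mem) (a : Word) (x : Nat) (h : f.readLE a 8 = x) (hx : x < 2 ^ 32) : f.readLE a 4 = x := by
  rw [readLE_prefix _ a 4 4, h]
  omega

end X86.User.Mem

namespace Gif.Spec
open X86 X86.User

/-- The low `k` bytes of a read of `k + j` bytes, for `rd`. -/
theorem rd_prefix (mem : Mem) (a k j : Nat) : rd mem a k = rd mem a (k + j) % 256 ^ k := by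
  unfold rd
  exact Mem.readLE_prefix mem _ k j

/-- The low byte of a dword field whose value is a byte. -/
theorem rd1_of_rd4_lt (mem : Mem) (a x : Nat) (h : rd mem a 4 = x) (hx : x < 256) : rd mem a 1 = x := by
  unfold rd at h ⊢
  exact Mem.readLE1_of_readLE4_lt mem _ x h hx

/-- The low dword of a qword field whose value is a dword. -/
theorem rd4_of_rd8_lt (mem : Mem) (a x : Nat) (h : rd mem a 8 = x) (hx : x < 2 ^ 32) : rd mem a 4 = x := by
  unfold rd at h ⊢
  exact Mem.readLE4_of_readLE8_lt mem _ x h hx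

end Gif.Spec

/-! ### §7 The walker's shadow addresses (namespace `Asan`)

  A shadow store of the instrumented code is `mov [r + 0xC00000 + k], imm` with the granule in `r`: the walker's address is
  `UInt64.ofNat g + (0xC00000 + k)`, the invariants speak of `shadowAddr (g + k)` (`storesMem`, `fillMem`,
  `ShadowInv.prologue_ra / epilogue_ra`).
-/
namespace Asan
open X86 X86.User

/-- The shadow byte of granule `g + k`, as the word the walker computes for `[r + 0xC00000 + k]` with `r = g`. With it the walker's nest of
shadow stores is `storesMem mem g F.prologue` / `F.epilogue`: `unfold storesMem <layout>; simp only [List.foldl_cons, List.foldl_nil,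
shadowAddr_granule_add]; rfl`. -/
theorem shadowAddr_granule_add (g k : Nat) : shadowAddr (g + k) = UInt64.ofNat g + UInt64.ofNat (0xC00000 + k) := by
  unfold shadowAddr
  rw [← UInt64.ofNat_add]
  congr 1
  omega

/-- The address `g + C00000H` with the granule `g` in a register is the shadow address of granule `g`. -/
theorem shadowAddr_of_granule (g : Nat) : UInt64.ofNat g + 12582912 = shadowAddr g := by
  unfold shadowAddr
  rw [Nat.add_comm, UInt64.ofNat_add]
  rfl

/-- `fillMem` with one more granule, the LAST store outermost (its definition has the first store innermost): the step of a loop that fills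
in ascending order. -/
theorem fillMem_last (mem : Mem) (g : Nat) (v : Byte) (k : Nat) :
    fillMem mem g v (k + 1) = (fillMem mem g v k).write (shadowAddr (g + k)) v := by
  induction k generalizing mem g with
  | zero => rfl
  | succ k ih =>
    have e : g + (k + 1) = g + 1 + k := by omega
    rw [fillMem, ih, e]
    rfl

end Asan
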